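-- pv_equiv track=rewrite | github.com/Strzelacz48/Semestr4Uwr | AI/L3/3_2_obrazki.py | revise_one
-- ===== SOURCE A (Python) =====
-- def revise_one(possibles, length, fix1):
--     if len(possibles) == 0:
--         return fix1, False
--     elif len(possibles) == 1:
--         fix1 = [True for _ in range(length)]
--     else:
--         for i in range(length):
--             if not fix1[i]:
--                 fix1[i] = True
--                 for p in possibles:
--                     if p[i] != possibles[0][i]:
--                         fix1[i] = False
--                         break
--     return fix1, True
-- ===== SOURCE B (Python) =====
-- # B: two-pass re-implementation. First pass (patterns outer, positions inner)
-- # collects the set `diff` of unfixed columns where some pattern disagrees with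
-- # possibles[0]; second pass fixes every unfixed column outside `diff`.
-- def revise_one(possibles, length, fix1):
--     if not possibles:
--         return fix1, False
--     if len(possibles) == 1:
--         return [True] * length, True
--     base = possibles[0]
--     diff = set()
--     for p in possibles:
--         for i in range(length):
--             if not fix1[i] and p[i] != base[i]:
--                 diff.add(i)
--     for i in range(length):
--         if not fix1[i]:
--             fix1[i] = i not in diff
--     return fix1, True
-- ===== Notes on version B (the rewrite author's own statement) =====
-- stated objective: alternative
-- what changed: Instead of A's per-position scan that tentatively sets fix1[i]=True and breaks out of an inner pattern loop, B first builds (patterns outer, positions inner) the set of unfixed columns where some pattern disagrees with possibles[0], then in a second pass fixes every unfixed column not in that set; Pre_ excludes ragged multi-candidate inputs where length exceeds some pattern's or fix1's size, where B's exhaustive first pass raises IndexError although A's early break may return.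
-- outside the precondition, e.g. on revise_one([[1, 1], [2, 2], [9]], 2, [False, False]): A returns ([False, False], True), B raises IndexError
import Mathlib
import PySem

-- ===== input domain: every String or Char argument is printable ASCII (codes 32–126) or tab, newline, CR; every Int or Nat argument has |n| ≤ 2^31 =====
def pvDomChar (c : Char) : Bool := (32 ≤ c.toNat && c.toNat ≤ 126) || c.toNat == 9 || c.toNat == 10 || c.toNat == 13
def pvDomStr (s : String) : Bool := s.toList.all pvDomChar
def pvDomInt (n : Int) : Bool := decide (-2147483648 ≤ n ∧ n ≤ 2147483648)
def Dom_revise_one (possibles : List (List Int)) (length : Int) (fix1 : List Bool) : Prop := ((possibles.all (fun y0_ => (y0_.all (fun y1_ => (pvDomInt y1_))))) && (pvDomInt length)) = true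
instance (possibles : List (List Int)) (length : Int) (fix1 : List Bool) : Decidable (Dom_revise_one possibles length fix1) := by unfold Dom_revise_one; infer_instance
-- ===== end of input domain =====

-- B builds the set of disagreeing unfixed columns first (patterns outer), then a second
-- pass fixes every unfixed column outside that set; both mutate fix1 in place.

-- ===== PORT A =====
-- inner 'for p in possibles: if p[i] != possibles[0][i]: fix1[i] = False; break'
def pvInnerA (base : List Int) (i : Int) (f : List Bool) : List (List Int) → List Bool
  | [] => f
  | p :: rest =>
      if PySem.List.pyGet? p i ≠ PySem.List.pyGet? base i then List.set f i.toNat false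
      else pvInnerA base i f rest

-- one iteration of 'for i in range(length)'; pyGet? f i = none is Python's IndexError, excluded by Pre_
def pvBodyA (possibles : List (List Int)) (f : List Bool) (i : Int) : List Bool :=
  match PySem.List.pyGet? f i with
  | none => f
  | some b =>
      if !b then pvInnerA ((PySem.List.pyGet? possibles 0).getD []) i (List.set f i.toNat true) possibles
      else f

def revise_one (possibles : List (List Int)) (length : Int) (fix1 : List Bool) : List Bool × Bool :=
  if possibles.length = 0 then (fix1, false)
  else if possibles.length = 1 then
    ((PySem.List.pyRange 0 length 1).map (fun _ => true), true)
  else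
    ((PySem.List.pyRange 0 length 1).foldl (pvBodyA possibles) fix1, true)

-- ===== PORT B =====
-- first pass: diff = set of unfixed column indices where some pattern disagrees with possibles[0]
def pvDiffB (fix1 : List Bool) (base : List Int) (length : Int) (possibles : List (List Int)) : PySem.Set Int :=
  possibles.foldl (fun d p =>
    (PySem.List.pyRange 0 length 1).foldl (fun d i =>
      if (PySem.List.pyGet? fix1 i).getD true = false ∧ PySem.List.pyGet? p i ≠ PySem.List.pyGet? base i
      then PySem.Set.add d i else d) d) PySem.Set.empty

-- second pass: 'if not fix1[i]: fix1[i] = i not in diff'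
def pvBodyB (diff : PySem.Set Int) (f : List Bool) (i : Int) : List Bool :=
  if (PySem.List.pyGet? f i).getD true = false then
    List.set f i.toNat (!(PySem.Set.contains diff i))
  else f

def revise_one_alt (possibles : List (List Int)) (length : Int) (fix1 : List Bool) : List Bool × Bool :=
  if possibles.isEmpty then (fix1, false)
  else if possibles.length = 1 then (List.replicate length.toNat true, true)
  else
    let base := (PySem.List.pyGet? possibles 0).getD []
    let diff := pvDiffB fix1 base length possibles
    ((PySem.List.pyRange 0 length 1).foldl (pvBodyB diff) fix1, true)

-- ===== PRECONDITION & SPEC =====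
-- Pre_ excludes inputs where Python A raises IndexError in the multi-candidate branch
-- (length > len(fix1)), and ragged pattern lists shorter than length, where B's
-- exhaustive first pass raises IndexError although A's early break may return.
def Pre_revise_one (possibles : List (List Int)) (length : Int) (fix1 : List Bool) : Prop :=
  2 ≤ possibles.length → (length ≤ (fix1.length : Int) ∧ ∀ p ∈ possibles, length ≤ (p.length : Int))
instance (possibles : List (List Int)) (length : Int) (fix1 : List Bool) : Decidable (Pre_revise_one possibles length fix1) := by unfold Pre_revise_one; infer_instance

def pvWitness_revise_one : List (List Int) × Int × List Bool := ([[1, 2], [1, 3]], 2, [false, false])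

def Spec_revise_one (possibles : List (List Int)) (length : Int) (fix1 : List Bool) (out : List Bool × Bool) : Prop := out = revise_one_alt possibles length fix1
instance (possibles : List (List Int)) (length : Int) (fix1 : List Bool) (out : List Bool × Bool) : Decidable (Spec_revise_one possibles length fix1 out) := by unfold Spec_revise_one; infer_instance

-- ===== CLAIM (what is proved, stated in full; the proofs are below) =====
def Claim_equal_revise_one : Prop := ∀ (possibles : List (List Int)) (length : Int) (fix1 : List Bool), Dom_revise_one possibles length fix1 → Pre_revise_one possibles length fix1 → Spec_revise_one possibles length fix1 (revise_one possibles length fix1)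

-- ===== LEMMAS AND PROOFS =====

-- agreement of all patterns with the base at column i
def pvAgree (possibles : List (List Int)) (base : List Int) (i : Int) : Bool :=
  possibles.all (fun p => PySem.List.pyGet? p i == PySem.List.pyGet? base i)

theorem pvInnerA_eq (base : List Int) (i : Int) (f : List Bool) (ps : List (List Int)) :
    pvInnerA base i f ps =
      if ps.all (fun p => PySem.List.pyGet? p i == PySem.List.pyGet? base i) then f
      else List.set f i.toNat false := by
  induction ps with
  | nil => simp [pvInnerA]
  | cons p rest ih =>
      by_cases h : PySem.List.pyGet? p i = PySem.List.pyGet? base i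
      · simp [pvInnerA, h, ih]
      · simp [pvInnerA, h]

theorem pvBodyA_eq (possibles : List (List Int)) (f : List Bool) (i : Int) :
    pvBodyA possibles f i =
      match PySem.List.pyGet? f i with
      | none => f
      | some b =>
          if b then f
          else List.set f i.toNat (pvAgree possibles ((PySem.List.pyGet? possibles 0).getD []) i) := by
  unfold pvBodyA pvAgree
  cases hg : PySem.List.pyGet? f i with
  | none => rfl
  | some b =>
      cases b with
      | true => simp
      | false =>
          show pvInnerA _ i (List.set f i.toNat true) possibles = _
          rw [pvInnerA_eq, List.set_set]
          by_cases h' : possibles.all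
              (fun p => PySem.List.pyGet? p i == PySem.List.pyGet? ((PySem.List.pyGet? possibles 0).getD []) i) = true <;>
            simp [h']

theorem pvBodyA_length (possibles : List (List Int)) (f : List Bool) (i : Int) :
    (pvBodyA possibles f i).length = f.length := by
  rw [pvBodyA_eq]
  cases PySem.List.pyGet? f i with
  | none => rfl
  | some b => cases b <;> simp

theorem pvFoldA_length (possibles : List (List Int)) (l : List Int) (fix1 : List Bool) :
    (l.foldl (pvBodyA possibles) fix1).length = fix1.length := by
  induction l generalizing fix1 with
  | nil => rfl
  | cons i rest ih => simp [List.foldl_cons, ih, pvBodyA_length]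

theorem pvFoldA_getElem (possibles : List (List Int)) (fix1 : List Bool) (m : Nat) :
    ∀ (k : Nat) (hk : k < fix1.length),
      (((List.range m).map (fun (j : Nat) => (j : Int))).foldl (pvBodyA possibles) fix1)[k]? =
        some (if k < m ∧ fix1[k] = false then
          pvAgree possibles ((PySem.List.pyGet? possibles 0).getD []) k
        else fix1[k]) := by
  induction m with
  | zero =>
      intro k hk
      simp [List.getElem?_eq_getElem hk]
  | succ m ih =>
      intro k hk
      rw [List.range_succ, List.map_append, List.foldl_append]
      simp only [List.map_cons, List.map_nil, List.foldl_cons, List.foldl_nil]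
      have hlen : (((List.range m).map (fun (j : Nat) => (j : Int))).foldl (pvBodyA possibles) fix1).length
          = fix1.length := pvFoldA_length _ _ _
      rw [pvBodyA_eq]
      have hgetm : PySem.List.pyGet? (((List.range m).map (fun (j : Nat) => (j : Int))).foldl (pvBodyA possibles) fix1) (m : Int)
          = (((List.range m).map (fun (j : Nat) => (j : Int))).foldl (pvBodyA possibles) fix1)[m]? :=
        PySem.List.pyGet?_natCast _ _
      by_cases hmn : m < fix1.length
      · rw [hgetm, ih m hmn, if_neg (by simp)]
        by_cases hf : fix1[m] = true
        · simp only [hf]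
          rw [if_pos trivial, ih k hk]
          by_cases hkm : k = m
          · subst hkm; simp [hf]
          · have hiff : (k < m ∧ fix1[k] = false) ↔ (k < m + 1 ∧ fix1[k] = false) := by
              constructor
              · rintro ⟨h1, h2⟩; exact ⟨by omega, h2⟩
              · rintro ⟨h1, h2⟩; exact ⟨by omega, h2⟩
            rw [if_congr hiff rfl rfl]
        · have hf' : fix1[m] = false := by simpa using hf
          simp only [hf']
          rw [if_neg (by simp), List.getElem?_set]
          simp only [Int.toNat_natCast]
          by_cases hkm : m = k
          · subst hkm
            rw [if_pos rfl, if_pos (by omega), if_pos ⟨by omega, hf'⟩]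
          · rw [if_neg hkm, ih k hk]
            have hiff : (k < m ∧ fix1[k] = false) ↔ (k < m + 1 ∧ fix1[k] = false) := by
              constructor
              · rintro ⟨h1, h2⟩; exact ⟨by omega, h2⟩
              · rintro ⟨h1, h2⟩; exact ⟨by omega, h2⟩
            rw [if_congr hiff rfl rfl]
      · have : (((List.range m).map (fun (j : Nat) => (j : Int))).foldl (pvBodyA possibles) fix1)[m]? = none :=
          List.getElem?_eq_none (by omega)
        rw [hgetm, this, ih k hk]
        have hiff : (k < m ∧ fix1[k] = false) ↔ (k < m + 1 ∧ fix1[k] = false) := by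
          constructor
          · rintro ⟨h1, h2⟩; exact ⟨by omega, h2⟩
          · rintro ⟨h1, h2⟩; exact ⟨by omega, h2⟩
        rw [if_congr hiff rfl rfl]

theorem pvBodyB_length (diff : PySem.Set Int) (f : List Bool) (i : Int) :
    (pvBodyB diff f i).length = f.length := by
  unfold pvBodyB
  split_ifs <;> simp

theorem pvFoldB_length (diff : PySem.Set Int) (l : List Int) (fix1 : List Bool) :
    (l.foldl (pvBodyB diff) fix1).length = fix1.length := by
  induction l generalizing fix1 with
  | nil => rfl
  | cons i rest ih => simp [List.foldl_cons, ih, pvBodyB_length]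

theorem pvFoldB_getElem (diff : PySem.Set Int) (fix1 : List Bool) (m : Nat) :
    ∀ (k : Nat) (hk : k < fix1.length),
      (((List.range m).map (fun (j : Nat) => (j : Int))).foldl (pvBodyB diff) fix1)[k]? =
        some (if k < m ∧ fix1[k] = false then !(PySem.Set.contains diff (k : Int))
        else fix1[k]) := by
  induction m with
  | zero =>
      intro k hk
      simp [List.getElem?_eq_getElem hk]
  | succ m ih =>
      intro k hk
      rw [List.range_succ, List.map_append, List.foldl_append]
      simp only [List.map_cons, List.map_nil, List.foldl_cons, List.foldl_nil]
      have hlen : (((List.range m).map (fun (j : Nat) => (j : Int))).foldl (pvBodyB diff) fix1).length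
          = fix1.length := pvFoldB_length _ _ _
      rw [pvBodyB]
      have hgetm : PySem.List.pyGet? (((List.range m).map (fun (j : Nat) => (j : Int))).foldl (pvBodyB diff) fix1) (m : Int)
          = (((List.range m).map (fun (j : Nat) => (j : Int))).foldl (pvBodyB diff) fix1)[m]? :=
        PySem.List.pyGet?_natCast _ _
      by_cases hmn : m < fix1.length
      · rw [hgetm, ih m hmn]
        simp only [Nat.lt_irrefl, false_and, if_false, Option.getD_some]
        by_cases hf : fix1[m] = true
        · rw [if_neg (by simp [hf]), ih k hk]
          have hiff : (k < m ∧ fix1[k] = false) ↔ (k < m + 1 ∧ fix1[k] = false) := by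
            constructor
            · rintro ⟨h1, h2⟩; exact ⟨by omega, h2⟩
            · rintro ⟨h1, h2⟩
              refine ⟨?_, h2⟩
              rcases Nat.lt_succ_iff_lt_or_eq.mp h1 with h | h
              · exact h
              · subst h; exact absurd h2 (by simp [hf])
          rw [if_congr hiff rfl rfl]
        · have hf' : fix1[m] = false := by simpa using hf
          rw [if_pos hf', List.getElem?_set]
          simp only [Int.toNat_natCast]
          by_cases hkm : m = k
          · subst hkm
            rw [if_pos rfl, if_pos (by omega), if_pos ⟨by omega, hf'⟩]
          · rw [if_neg hkm, ih k hk]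
            have hiff : (k < m ∧ fix1[k] = false) ↔ (k < m + 1 ∧ fix1[k] = false) := by
              constructor
              · rintro ⟨h1, h2⟩; exact ⟨by omega, h2⟩
              · rintro ⟨h1, h2⟩; exact ⟨by omega, h2⟩
            rw [if_congr hiff rfl rfl]
      · have : (((List.range m).map (fun (j : Nat) => (j : Int))).foldl (pvBodyB diff) fix1)[m]? = none :=
          List.getElem?_eq_none (by omega)
        rw [hgetm, this]
        simp only [Option.getD_none]
        rw [if_neg (by decide), ih k hk]
        have hiff : (k < m ∧ fix1[k] = false) ↔ (k < m + 1 ∧ fix1[k] = false) := by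
          constructor
          · rintro ⟨h1, h2⟩; exact ⟨by omega, h2⟩
          · rintro ⟨h1, h2⟩; exact ⟨by omega, h2⟩
        rw [if_congr hiff rfl rfl]

theorem mem_foldl_ite_add (C : Int → Prop) [DecidablePred C] (l : List Int) :
    ∀ (d : PySem.Set Int) (x : Int),
      (x ∈ l.foldl (fun d i => if C i then PySem.Set.add d i else d) d) ↔ x ∈ d ∨ (x ∈ l ∧ C x) := by
  induction l with
  | nil => simp
  | cons i rest ih =>
      intro d x
      simp only [List.foldl_cons]
      by_cases h : C i
      · rw [if_pos h, ih]
        simp only [PySem.Set.mem_add, List.mem_cons]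
        constructor
        · rintro (⟨hd | he⟩ | hr)
          · exact Or.inl hd
          · subst he; exact Or.inr ⟨Or.inl rfl, h⟩
          · exact Or.inr ⟨Or.inr hr.1, hr.2⟩
        · rintro (hd | ⟨(he | hr), hc⟩)
          · exact Or.inl (Or.inl hd)
          · subst he; exact Or.inl (Or.inr rfl)
          · exact Or.inr ⟨hr, hc⟩
      · rw [if_neg h, ih]
        simp only [List.mem_cons]
        constructor
        · rintro (hd | hr)
          · exact Or.inl hd
          · exact Or.inr ⟨Or.inr hr.1, hr.2⟩
        · rintro (hd | ⟨(he | hr), hc⟩)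
          · exact Or.inl hd
          · subst he; exact absurd hc h
          · exact Or.inr ⟨hr, hc⟩

theorem mem_pvDiffB (fix1 : List Bool) (base : List Int) (L : Int) (possibles : List (List Int)) (x : Int) :
    x ∈ pvDiffB fix1 base L possibles ↔
      ∃ p ∈ possibles, x ∈ PySem.List.pyRange 0 L 1 ∧
        (PySem.List.pyGet? fix1 x).getD true = false ∧
        PySem.List.pyGet? p x ≠ PySem.List.pyGet? base x := by
  have aux : ∀ (ps : List (List Int)) (d : PySem.Set Int),
      (x ∈ ps.foldl (fun d p =>
        (PySem.List.pyRange 0 L 1).foldl (fun d i =>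
          if (PySem.List.pyGet? fix1 i).getD true = false ∧ PySem.List.pyGet? p i ≠ PySem.List.pyGet? base i
          then PySem.Set.add d i else d) d) d) ↔
      x ∈ d ∨ ∃ p ∈ ps, x ∈ PySem.List.pyRange 0 L 1 ∧
        ((PySem.List.pyGet? fix1 x).getD true = false ∧ PySem.List.pyGet? p x ≠ PySem.List.pyGet? base x) := by
    intro ps
    induction ps with
    | nil => simp
    | cons p rest ih =>
        intro d
        simp only [List.foldl_cons]
        rw [ih, mem_foldl_ite_add
          (C := fun i => (PySem.List.pyGet? fix1 i).getD true = false ∧ PySem.List.pyGet? p i ≠ PySem.List.pyGet? base i)]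
        simp only [List.mem_cons]
        constructor
        · rintro ((hd | ⟨hr, hc⟩) | ⟨q, hq, hr, hc⟩)
          · exact Or.inl hd
          · exact Or.inr ⟨p, Or.inl rfl, hr, hc⟩
          · exact Or.inr ⟨q, Or.inr hq, hr, hc⟩
        · rintro (hd | ⟨q, (hq | hq), hr, hc⟩)
          · exact Or.inl (Or.inl hd)
          · subst hq; exact Or.inl (Or.inr ⟨hr, hc⟩)
          · exact Or.inr ⟨q, hq, hr, hc⟩
  unfold pvDiffB
  rw [aux]
  simp [PySem.Set.empty]

theorem pvMultiCase (possibles : List (List Int)) (L : Int) (fix1 : List Bool) :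
    (PySem.List.pyRange 0 L 1).foldl (pvBodyA possibles) fix1 =
      (PySem.List.pyRange 0 L 1).foldl
        (pvBodyB (pvDiffB fix1 ((PySem.List.pyGet? possibles 0).getD []) L possibles)) fix1 := by
  apply List.ext_getElem?
  intro k
  rw [PySem.List.pyRange_zero]
  by_cases hk : k < fix1.length
  · rw [pvFoldA_getElem possibles fix1 L.toNat k hk, pvFoldB_getElem _ fix1 L.toNat k hk]
    congr 1
    by_cases hcond : k < L.toNat ∧ fix1[k] = false
    · rw [if_pos hcond, if_pos hcond]
      obtain ⟨hkL', hf'⟩ := hcond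
      have hkL : (k : Int) < L := by omega
      have hfk : PySem.List.pyGet? fix1 (k : Int) = some fix1[k] := by
        rw [PySem.List.pyGet?_natCast]
        exact List.getElem?_eq_getElem hk
      have hcont : PySem.Set.contains (pvDiffB fix1 ((PySem.List.pyGet? possibles 0).getD []) L possibles) (k : Int) = true ↔
          ∃ p ∈ possibles, PySem.List.pyGet? p (k : Int) ≠ PySem.List.pyGet? ((PySem.List.pyGet? possibles 0).getD []) (k : Int) := by
        rw [PySem.Set.contains_iff, mem_pvDiffB]
        simp only [PySem.List.mem_pyRange_one, hfk, Option.getD_some]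
        constructor
        · rintro ⟨p, hp, _, _, hne⟩
          exact ⟨p, hp, hne⟩
        · rintro ⟨p, hp, hne⟩
          exact ⟨p, hp, ⟨by positivity, hkL⟩, hf', hne⟩
      by_cases hex : ∃ p ∈ possibles, PySem.List.pyGet? p (k : Int) ≠ PySem.List.pyGet? ((PySem.List.pyGet? possibles 0).getD []) (k : Int)
      · rw [hcont.mpr hex]
        unfold pvAgree
        obtain ⟨p, hp, hne⟩ := hex
        simp only [Bool.not_true]
        rw [List.all_eq_false]
        exact ⟨p, hp, by simpa using hne⟩
      · have : PySem.Set.contains (pvDiffB fix1 ((PySem.List.pyGet? possibles 0).getD []) L possibles) (k : Int) = false := by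
          rw [Bool.eq_false_iff]
          intro hc
          exact hex (hcont.mp hc)
        rw [this]
        unfold pvAgree
        simp only [Bool.not_false]
        rw [List.all_eq_true]
        intro p hp
        by_contra hne
        exact hex ⟨p, hp, by simpa using hne⟩
    · rw [if_neg hcond, if_neg hcond]
  · have h1 : (((List.range L.toNat).map (fun (j : Nat) => (j : Int))).foldl (pvBodyA possibles) fix1)[k]? = none :=
      List.getElem?_eq_none (by rw [pvFoldA_length]; omega)
    have h2 : (((List.range L.toNat).map (fun (j : Nat) => (j : Int))).foldl
        (pvBodyB (pvDiffB fix1 ((PySem.List.pyGet? possibles 0).getD []) L possibles)) fix1)[k]? = none :=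
      List.getElem?_eq_none (by rw [pvFoldB_length]; omega)
    rw [h1, h2]

-- ===== VERDICT (by name: the statement is the Claim_ definition above) =====
theorem revise_one_spec : Claim_equal_revise_one := by
  intro possibles L fix1 _dom hpre
  unfold Spec_revise_one revise_one revise_one_alt
  by_cases h0 : possibles.length = 0
  · simp [List.length_eq_zero_iff.mp h0]
  · by_cases h1 : possibles.length = 1
    · rw [if_neg h0, if_pos h1, if_neg (by intro h; exact h0 (by simpa using List.isEmpty_iff.mp h)), if_pos h1]
      refine Prod.ext ?_ rfl
      simp [PySem.List.pyRange_one, List.map_const']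
    · rw [if_neg h0, if_neg h1, if_neg (by intro h; exact h0 (by simpa using List.isEmpty_iff.mp h)), if_neg h1]
      exact Prod.ext (pvMultiCase possibles L fix1) rfl
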